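-- pv_equiv track=rewrite | github.com/brubsby/oeis_py | sequences/A291633.py | get_big_zeros_midpos
-- ===== SOURCE A (Python) =====
-- def get_big_zeros_midpos(number, lookup):
--     binary_str = lookup[number]
--     num_zeros = binary_str.count("0")
--     passed_zeros = 0
--     index = 1
--     if num_zeros % 2 == 0:
--         while passed_zeros < num_zeros // 2:
--             if binary_str[index] == "0":
--                 passed_zeros += 1
--             index += 1
--         return index * 2
--     else:
--         while passed_zeros < num_zeros // 2:
--             if binary_str[index] == "0":
--                 passed_zeros += 1
--             index += 1
--         return index * 2 + 1
-- ===== SOURCE B (Python) =====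
-- def get_big_zeros_midpos(number, lookup):
--     binary_str = lookup[number]
--     num_zeros = binary_str.count("0")
--     k = num_zeros // 2
--     if k == 0:
--         return 2 + num_zeros % 2
--     # prefix[j] = number of zeros among binary_str[1..j+1]
--     prefix = []
--     acc = 0
--     for c in binary_str[1:]:
--         if c == "0":
--             acc += 1
--         prefix.append(acc)
--     # binary search for the first j with prefix[j] >= k
--     lo, hi = 0, len(prefix)
--     while lo < hi:
--         mid = (lo + hi) // 2
--         if prefix[mid] < k:
--             lo = mid + 1
--         else:
--             hi = mid
--     return 2 * (lo + 2) + num_zeros % 2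
-- ===== Notes on version B (the rewrite author's own statement) =====
-- stated objective: alternative
-- what changed: Instead of A's early-stopping counter while-loop, B builds a prefix-sum array of zero counts over binary_str[1:] and binary-searches it for the first position whose zero count reaches num_zeros//2, then applies the single parity formula 2*(pos+2) + num_zeros%2 in place of A's two branches.
import Mathlib
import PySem

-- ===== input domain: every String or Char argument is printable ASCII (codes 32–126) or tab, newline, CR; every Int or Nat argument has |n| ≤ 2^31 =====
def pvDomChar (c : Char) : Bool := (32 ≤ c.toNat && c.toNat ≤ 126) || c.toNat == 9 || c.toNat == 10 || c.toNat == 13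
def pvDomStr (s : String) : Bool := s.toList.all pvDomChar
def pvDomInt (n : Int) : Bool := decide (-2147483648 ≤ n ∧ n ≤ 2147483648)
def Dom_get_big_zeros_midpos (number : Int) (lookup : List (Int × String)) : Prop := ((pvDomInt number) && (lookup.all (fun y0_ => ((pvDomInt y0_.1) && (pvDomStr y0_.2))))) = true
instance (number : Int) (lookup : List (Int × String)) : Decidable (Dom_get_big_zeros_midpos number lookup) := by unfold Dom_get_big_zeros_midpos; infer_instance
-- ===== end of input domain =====

-- B replaces A's early-stopping counter while-loop by a prefix-sum array of zero counts plus
-- a binary search for the first position reaching num_zeros//2 (objective: alternative).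

-- ===== PORT A =====
-- A's while-loop: it reads binary_str[index] with index increasing by exactly 1 each
-- iteration, so it walks the suffix of the characters starting at index 1, carrying
-- (passed_zeros, index) exactly as A does.  On [] with passed < k Python would raise
-- IndexError; that situation is unreachable whenever the key is present (proved below
-- via the zero-count invariant), so the returned value there is never relied on.
def pvALoop (k : Int) : List Char → Int → Int → Int
  | [], _, index => index
  | c :: r, passed, index =>
    if passed < k then pvALoop k r (if c = '0' then passed + 1 else passed) (index + 1)
    else index

def get_big_zeros_midpos (number : Int) (lookup : List (Int × String)) : Int :=
  match List.lookup number lookup with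
  | none => 0   -- KeyError: excluded by Pre_
  | some binary_str =>
    let num_zeros : Int := (PySem.Str.count binary_str "0" : Int)
    if PySem.Int.mod num_zeros 2 = 0 then
      pvALoop (PySem.Int.floordiv num_zeros 2) (binary_str.toList.drop 1) 0 1 * 2
    else
      pvALoop (PySem.Int.floordiv num_zeros 2) (binary_str.toList.drop 1) 0 1 * 2 + 1

-- ===== PORT B =====
-- the `for c in binary_str[1:]` loop building the prefix list, carrying `acc` exactly as Source B
def pvPrefix : List Char → Int → List Int
  | [], _ => []
  | c :: r, acc =>
    let a := if c = '0' then acc + 1 else acc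
    a :: pvPrefix r a

-- Source B's `while lo < hi` binary search; prefix[mid] is in range on every iteration,
-- so `(pyGet? …).getD 0` is exact for Python's prefix[mid].
def pvBS (P : List Int) (k : Int) (lo hi : Nat) : Nat :=
  if h : lo < hi then
    if (PySem.List.pyGet? P (((lo + hi) / 2 : Nat) : Int)).getD 0 < k then
      pvBS P k ((lo + hi) / 2 + 1) hi
    else pvBS P k lo ((lo + hi) / 2)
  else lo
termination_by hi - lo
decreasing_by all_goals omega

def get_big_zeros_midpos_alt (number : Int) (lookup : List (Int × String)) : Int :=
  match List.lookup number lookup with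
  | none => 0   -- KeyError: excluded by Pre_
  | some binary_str =>
    let num_zeros : Int := (PySem.Str.count binary_str "0" : Int)
    let k := PySem.Int.floordiv num_zeros 2
    if k = 0 then 2 + PySem.Int.mod num_zeros 2
    else
      let pref := pvPrefix (binary_str.toList.drop 1) 0
      let lo := pvBS pref k 0 pref.length
      2 * ((lo : Int) + 2) + PySem.Int.mod num_zeros 2

-- ===== PRECONDITION & SPEC =====
-- Pre_ excludes exactly the inputs where Python's `lookup[number]` raises KeyError.
def Pre_get_big_zeros_midpos (number : Int) (lookup : List (Int × String)) : Prop :=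
  (List.lookup number lookup).isSome = true
instance (number : Int) (lookup : List (Int × String)) : Decidable (Pre_get_big_zeros_midpos number lookup) := by unfold Pre_get_big_zeros_midpos; infer_instance

def pvWitness_get_big_zeros_midpos : Int × (List (Int × String)) := (3, [(3, "1001")])

def Spec_get_big_zeros_midpos (number : Int) (lookup : List (Int × String)) (out : Int) : Prop := out = get_big_zeros_midpos_alt number lookup
instance (number : Int) (lookup : List (Int × String)) (out : Int) : Decidable (Spec_get_big_zeros_midpos number lookup out) := by unfold Spec_get_big_zeros_midpos; infer_instance

-- ===== CLAIM (what is proved, stated in full; the proofs are below) =====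
def Claim_equal_get_big_zeros_midpos : Prop := ∀ (number : Int) (lookup : List (Int × String)), Dom_get_big_zeros_midpos number lookup → Pre_get_big_zeros_midpos number lookup → Spec_get_big_zeros_midpos number lookup (get_big_zeros_midpos number lookup)

-- ===== LEMMAS AND PROOFS =====

-- `s.count("0")` counts the character '0' (single-character pattern).
lemma pv_count_go1 : ∀ (fuel : Nat) (l : List Char) (acc : Nat), l.length ≤ fuel →
    PySem.Chars.count.go ['0'] fuel l acc = acc + l.count '0' := by
  intro fuel
  induction fuel with
  | zero =>
    intro l acc h
    rw [List.length_eq_zero_iff.mp (Nat.le_zero.mp h)]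
    simp [PySem.Chars.count.go]
  | succ n ih =>
    intro l acc h
    match l with
    | [] => simp [PySem.Chars.count.go]
    | c :: t =>
      have ht : t.length ≤ n := by simpa using h
      rw [PySem.Chars.count.go]
      by_cases hc : c = '0'
      · subst hc
        rw [if_pos (by simp [List.isPrefixOf])]
        have hd : List.drop ['0'].length ('0' :: t) = t := by simp
        rw [hd, ih t (acc + 1) ht, List.count_cons_self]
        omega
      · rw [if_neg (by simp [List.isPrefixOf]; exact fun hh => absurd hh.symm hc)]
        rw [ih t acc ht, List.count_cons_of_ne (by simpa using hc)]

lemma pv_count_single (cs : List Char) : PySem.Chars.count cs ['0'] = cs.count '0' := by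
  simp [PySem.Chars.count, pv_count_go1 cs.length cs 0 le_rfl]

-- number of zeros among the first m characters, as an Int
def pvCnt (t : List Char) (m : Nat) : Int := ((t.take m).count '0' : Nat)

lemma pv_cnt_mono (t : List Char) {i j : Nat} (h : i ≤ j) : pvCnt t i ≤ pvCnt t j := by
  unfold pvCnt
  have heq : t.take i = (t.take j).take i := by
    rw [List.take_take, Nat.min_eq_left h]
  have : (t.take i).count '0' ≤ (t.take j).count '0' := by
    rw [heq]; exact (List.take_sublist _ _).count_le _
  exact_mod_cast this

lemma pv_aloop_stop (k : Int) (t : List Char) (passed index : Int) (h : ¬ passed < k) :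
    pvALoop k t passed index = index := by
  cases t <;> simp [pvALoop, h]

-- A's loop advances index by exactly the least m whose prefix contains k - passed zeros.
lemma pv_aloop_min : ∀ (t : List Char) (k passed index : Int) (m : Nat), passed < k →
    k - passed ≤ pvCnt t m →
    (∀ m' : Nat, m' < m → pvCnt t m' < k - passed) →
    pvALoop k t passed index = index + m := by
  intro t
  induction t with
  | nil =>
    intro k passed index m h h2 _
    exfalso; unfold pvCnt at h2; simp at h2; omega
  | cons c r ih =>
    intro k passed index m h h2 h3
    match m with
    | 0 => exfalso; unfold pvCnt at h2; simp at h2; omega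
    | Nat.succ n =>
      rw [pvALoop, if_pos h]
      by_cases hc : c = '0'
      · subst hc
        rw [if_pos rfl]
        have hcnt : pvCnt ('0' :: r) (n + 1) = 1 + pvCnt r n := by
          unfold pvCnt; simp [List.count_cons_self]; omega
        by_cases h2' : passed + 1 < k
        · rw [ih k (passed + 1) (index + 1) n h2'
            (by rw [hcnt] at h2; omega)
            (fun m' hm' => by
              have := h3 (m' + 1) (by omega)
              have hc' : pvCnt ('0' :: r) (m' + 1) = 1 + pvCnt r m' := by
                unfold pvCnt; simp [List.count_cons_self]; omega
              rw [hc'] at this; omega)]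
          push_cast; ring
        · have hk : k = passed + 1 := by omega
          have hn : n = 0 := by
            by_contra hn0
            have := h3 1 (by omega)
            unfold pvCnt at this; simp at this; omega
          subst hn
          rw [pv_aloop_stop k r (passed + 1) (index + 1) (by omega)]
          push_cast; ring
      · rw [if_neg hc]
        have hcnt : ∀ m' : Nat, pvCnt (c :: r) (m' + 1) = pvCnt r m' := by
          intro m'; unfold pvCnt; simp [List.count_cons_of_ne (by simpa using hc)]
        rw [ih k passed (index + 1) n h
          (by rw [hcnt n] at h2; omega)
          (fun m' hm' => by have := h3 (m' + 1) (by omega); rw [hcnt m'] at this; omega)]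
        push_cast; ring

lemma pv_prefix_length (t : List Char) (acc : Int) : (pvPrefix t acc).length = t.length := by
  induction t generalizing acc with
  | nil => rfl
  | cons c r ih => simp [pvPrefix, ih]

lemma pv_prefix_get : ∀ (t : List Char) (acc : Int) (j : Nat), j < t.length →
    (pvPrefix t acc)[j]? = some (acc + pvCnt t (j + 1)) := by
  intro t
  induction t with
  | nil => intro acc j h; simp at h
  | cons c r ih =>
    intro acc j h
    match j with
    | 0 =>
      unfold pvPrefix pvCnt
      by_cases hc : c = '0'
      · subst hc; simp
      · simp [hc, List.count_cons_of_ne (by simpa using hc)]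
    | Nat.succ n =>
      have hn : n < r.length := by simpa using h
      unfold pvPrefix
      simp only [List.getElem?_cons_succ]
      rw [ih _ n hn]
      by_cases hc : c = '0'
      · subst hc
        have : pvCnt ('0' :: r) (n + 1 + 1) = 1 + pvCnt r (n + 1) := by
          unfold pvCnt; simp [List.count_cons_self]; omega
        simp [this]; ring
      · have : pvCnt (c :: r) (n + 1 + 1) = pvCnt r (n + 1) := by
          unfold pvCnt; simp [List.count_cons_of_ne (by simpa using hc)]
        simp [hc, this]

-- reading the prefix array of Source B
lemma pv_prefix_read (t : List Char) (j : Nat) (h : j < t.length) :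
    (PySem.List.pyGet? (pvPrefix t 0) (j : Int)).getD 0 = pvCnt t (j + 1) := by
  rw [PySem.List.pyGet?_natCast, pv_prefix_get t 0 j h]
  simp

-- binary-search invariant: the result r keeps all positions < r below k and all ≥ r at ≥ k
lemma pv_bs_spec (t : List Char) (k : Int) :
    ∀ (n lo hi : Nat), hi - lo = n → lo ≤ hi → hi ≤ t.length →
    (∀ i : Nat, i < lo → pvCnt t (i + 1) < k) →
    (∀ i : Nat, hi ≤ i → i < t.length → k ≤ pvCnt t (i + 1)) →
    lo ≤ pvBS (pvPrefix t 0) k lo hi ∧ pvBS (pvPrefix t 0) k lo hi ≤ hi ∧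
    (∀ i : Nat, i < pvBS (pvPrefix t 0) k lo hi → pvCnt t (i + 1) < k) ∧
    (∀ i : Nat, pvBS (pvPrefix t 0) k lo hi ≤ i → i < t.length → k ≤ pvCnt t (i + 1)) := by
  intro n
  induction n using Nat.strong_induction_on with
  | _ n ihn =>
    intro lo hi hn hlh hhl h1 h2
    by_cases h : lo < hi
    · rw [pvBS, dif_pos h]
      have hmid1 : lo ≤ (lo + hi) / 2 := by omega
      have hmid2 : (lo + hi) / 2 < hi := by omega
      have hmlen : (lo + hi) / 2 < t.length := by omega
      rw [pv_prefix_read t _ hmlen]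
      by_cases hcmp : pvCnt t ((lo + hi) / 2 + 1) < k
      · rw [if_pos hcmp]
        exact (fun res => ⟨by omega, res.2.1, res.2.2⟩) <|
          ihn (hi - ((lo + hi) / 2 + 1)) (by omega) _ _ rfl (by omega) hhl
            (fun i hi' => lt_of_le_of_lt (pv_cnt_mono t (by omega)) hcmp) h2
      · rw [if_neg hcmp]
        exact (fun res => ⟨res.1, by omega, res.2.2.1,
            res.2.2.2⟩) <|
          ihn ((lo + hi) / 2 - lo) (by omega) _ _ rfl (by omega) (by omega) h1
            (fun i hi1 hi2 => le_trans (not_lt.mp hcmp) (pv_cnt_mono t (by omega)))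
    · rw [pvBS, dif_neg h]
      have : lo = hi := by omega
      subst this
      exact ⟨le_rfl, le_rfl, h1, h2⟩

-- ===== VERDICT (by name: the statement is the Claim_ definition above) =====
theorem get_big_zeros_midpos_spec : Claim_equal_get_big_zeros_midpos := by
  intro number lookup _ hpre
  unfold Spec_get_big_zeros_midpos get_big_zeros_midpos get_big_zeros_midpos_alt
  unfold Pre_get_big_zeros_midpos at hpre
  cases hl : List.lookup number lookup with
  | none => simp [hl] at hpre
  | some s =>
    dsimp only
    have hnz : ((PySem.Str.count s "0" : Nat) : Int) = (s.toList.count '0' : Int) := by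
      have h0 : "0".toList = ['0'] := rfl
      simp [h0, pv_count_single]
    set nz : Int := ((PySem.Str.count s "0" : Nat) : Int) with hnzdef
    have hnz0 : (0:Int) ≤ nz := by rw [hnzdef]; positivity
    have hfk : PySem.Int.floordiv nz 2 = nz / 2 :=
      PySem.Int.floordiv_eq_ediv_of_pos (by norm_num)
    have hm : PySem.Int.mod nz 2 = nz % 2 :=
      PySem.Int.mod_eq_emod_of_pos (by norm_num)
    rw [hm, hfk]
    by_cases hk0 : nz / 2 = 0
    · -- the loop never runs; both sides give index 1, value 2 + parity
      rw [pv_aloop_stop (nz / 2) _ 0 1 (by omega), if_pos hk0]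
      split_ifs <;> omega
    · have hk1 : 1 ≤ nz / 2 := by omega
      have hnz2 : 2 ≤ nz := by omega
      cases hcse : s.toList with
      | nil => rw [hcse] at hnz; simp at hnz; omega
      | cons c r =>
        -- the tail r contains at least nz/2 zeros
        have hrcnt : nz / 2 ≤ pvCnt r r.length := by
          rw [hcse] at hnz
          unfold pvCnt
          rw [List.take_length]
          by_cases hc : c = '0'
          · subst hc; rw [List.count_cons_self] at hnz; push_cast at hnz ⊢; omega
          · rw [List.count_cons_of_ne (by simpa using hc)] at hnz; omega
        simp only [List.drop_succ_cons, List.drop_zero]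
        rw [pv_prefix_length]
        obtain ⟨_, hle, hlt, hge⟩ :=
          pv_bs_spec r (nz / 2) (r.length - 0) 0 r.length rfl (by omega) le_rfl
            (by omega) (by omega)
        set rr := pvBS (pvPrefix r 0) (nz / 2) 0 r.length with hrr
        have hrlen : rr < r.length := by
          rcases Nat.lt_or_ge rr r.length with h | h
          · exact h
          · exfalso
            have hlp : 1 ≤ r.length := by
              by_contra hh
              have : r.length = 0 := by omega
              unfold pvCnt at hrcnt; rw [this] at hrcnt; simp at hrcnt; omega
            have := hlt (r.length - 1) (by omega)
            have h2 : pvCnt r (r.length - 1 + 1) = pvCnt r r.length := by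
              congr 1; omega
            rw [h2] at this; omega
        have hA : pvALoop (nz / 2) r 0 1 = 1 + (rr + 1 : Nat) := by
          apply pv_aloop_min r (nz / 2) 0 1 (rr + 1) (by omega)
          · have := hge rr le_rfl hrlen; omega
          · intro m' hm'
            match m' with
            | 0 => unfold pvCnt; simp; omega
            | Nat.succ i =>
              have := hlt i (by omega)
              simpa [Nat.succ_eq_add_one] using this
        rw [hA, if_neg hk0]
        split_ifs <;> push_cast <;> omega

theorem get_big_zeros_midpos_pre_witness :
    Dom_get_big_zeros_midpos pvWitness_get_big_zeros_midpos.1 pvWitness_get_big_zeros_midpos.2 ∧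
    Pre_get_big_zeros_midpos pvWitness_get_big_zeros_midpos.1 pvWitness_get_big_zeros_midpos.2 := by
  decide
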